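-- pv_equiv track=rewrite | github.com/Randoom97/AOC | 2025/day2/day2.py | is_valid_id
-- ===== SOURCE A (Python) =====
-- def is_valid_id(id: str) -> bool:
--     max_char_dist = len(id) // 2
--     for char_dist in range(1, max_char_dist+1):
--         if len(id) % char_dist != 0:
--             continue
--         invalid_found = True
--         for i in range(0, char_dist):
--             for j in range(i, len(id)-char_dist, char_dist):
--                 if id[j] != id[j+char_dist]:
--                     invalid_found = False
--                     break
--         if invalid_found:
--             return False
--     return True
-- ===== SOURCE B (Python) =====
-- def is_valid_id(id: str) -> bool:
--     if not id:
--         return True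
--     return id not in (id + id)[1:-1]
-- ===== Notes on version B (the rewrite author's own statement) =====
-- stated objective: faster
-- what changed: Replaces A's trial of every candidate period (divisor scan with nested per-residue index loops, O(n^2) in the worst case) by the classic rotation trick: a string is a repetition of a shorter block exactly when it occurs inside (id+id)[1:-1], so B does a single substring search (plus an explicit empty-string case).
import Mathlib
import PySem

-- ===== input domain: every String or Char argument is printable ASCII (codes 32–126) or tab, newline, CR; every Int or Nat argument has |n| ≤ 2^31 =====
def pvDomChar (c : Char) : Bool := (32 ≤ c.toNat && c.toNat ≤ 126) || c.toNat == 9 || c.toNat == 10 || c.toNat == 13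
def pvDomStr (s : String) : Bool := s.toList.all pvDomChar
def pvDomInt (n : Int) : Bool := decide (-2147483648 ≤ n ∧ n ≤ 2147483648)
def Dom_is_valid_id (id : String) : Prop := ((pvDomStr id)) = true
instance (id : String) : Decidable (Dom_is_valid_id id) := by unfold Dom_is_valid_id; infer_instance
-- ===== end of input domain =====

-- B replaces A's trial of every candidate period via nested index loops by the classic
-- rotation trick: a string is a repetition of a shorter block iff it occurs inside
-- (id+id)[1:-1]; objective: a single substring search instead of nested scans.

-- ===== PORT A =====
-- inner two loops of A: 'invalid_found' threaded through 'for i in range(0, char_dist):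
-- for j in range(i, len(id)-char_dist, char_dist): if id[j] != id[j+char_dist]: invalid_found = False; break'
-- (the break only skips useless work: once a mismatch is seen the flag stays false)
def pvInnerA (s : List Char) (n d : Int) : Bool :=
  (PySem.List.pyRange 0 d 1).foldl (fun acc i =>
    (PySem.List.pyRange i (n - d) d).foldl (fun acc2 j =>
      if PySem.List.pyGet? s j ≠ PySem.List.pyGet? s (j + d) then false else acc2) acc) true

-- outer loop of A with its 'continue' and early 'return False'
def pvLoopA (s : List Char) (n : Int) : List Int → Bool
  | [] => true
  | d :: rest =>
    if PySem.Int.mod n d ≠ 0 then pvLoopA s n rest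
    else if pvInnerA s n d then false
    else pvLoopA s n rest

def is_valid_id (id : String) : Bool :=
  let s := id.toList
  let n : Int := (s.length : Int)
  pvLoopA s n (PySem.List.pyRange 1 (PySem.Int.floordiv n 2 + 1) 1)

-- ===== PORT B =====
-- B: 'if not id: return True' then 'return id not in (id + id)[1:-1]'
def is_valid_id_alt (id : String) : Bool :=
  let s := id.toList
  if s.isEmpty then true
  else !(PySem.Chars.isIn s (PySem.List.slice (s ++ s) (some 1) (some (-1))))

-- ===== PRECONDITION & SPEC =====
def Spec_is_valid_id (id : String) (out : Bool) : Prop := out = is_valid_id_alt id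
instance (id : String) (out : Bool) : Decidable (Spec_is_valid_id id out) := by unfold Spec_is_valid_id; infer_instance

-- ===== CLAIM (what is proved, stated in full; the proofs are below) =====
def Claim_equal_is_valid_id : Prop := ∀ (id : String), Dom_is_valid_id id → Spec_is_valid_id id (is_valid_id id)

-- ===== LEMMAS AND PROOFS =====

-- l has (chain) period p: every position equals the one p further on
def pvPer (l : List Char) (p : Nat) : Prop := ∀ j : Nat, j + p < l.length → l[j]? = l[j + p]?
-- l is invariant under rotation by t
def pvRot (l : List Char) (t : Nat) : Prop := ∀ j : Nat, j < l.length → l[j]? = l[(j + t) % l.length]?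

-- ---- generic fold shapes ----
theorem pv_foldl_if_false {α : Type} (p : α → Prop) [DecidablePred p] (xs : List α) (acc : Bool) :
    xs.foldl (fun a j => if p j then false else a) acc = (acc && xs.all (fun j => !decide (p j))) := by
  induction xs generalizing acc with
  | nil => simp
  | cons x xs ih =>
    simp only [List.foldl_cons, List.all_cons, ih]
    by_cases h : p x <;> simp [h]

theorem pv_foldl_and {α : Type} (h : α → Bool) (xs : List α) (b : Bool) :
    xs.foldl (fun a i => a && h i) b = (b && xs.all h) := by
  induction xs generalizing b with
  | nil => simp
  | cons x xs ih => simp [List.foldl_cons, ih, Bool.and_assoc]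

-- ---- membership in a positive-step range ----
theorem pv_mem_pyRange_pos {i b d j : Int} (hd : 0 < d) :
    j ∈ PySem.List.pyRange i b d ↔ ∃ k : Nat, j = i + d * k ∧ j < b := by
  simp only [PySem.List.pyRange]
  have hd0 : ¬ d = 0 := by omega
  simp only [hd0, if_false, hd, if_true, List.mem_map, List.mem_range]
  by_cases hib : i < b
  · simp only [hib, if_true]
    constructor
    · rintro ⟨k, hk, rfl⟩
      refine ⟨k, rfl, ?_⟩
      have h1 : (k : Int) < (b - i + d - 1) / d := Int.lt_toNat.mp hk
      have h2 : (k : Int) + 1 ≤ (b - i + d - 1) / d := by omega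
      have := (Int.le_ediv_iff_mul_le hd).mp h2
      nlinarith
    · rintro ⟨k, rfl, hlt⟩
      refine ⟨k, ?_, rfl⟩
      have h2 : (k : Int) + 1 ≤ (b - i + d - 1) / d := by
        rw [Int.le_ediv_iff_mul_le hd]; nlinarith
      exact Int.lt_toNat.mpr (by omega)
  · simp only [hib, if_false]
    constructor
    · rintro ⟨k, hk, _⟩; omega
    · rintro ⟨k, rfl, hlt⟩
      have : (0 : Int) ≤ d * k := by positivity
      omega

-- ---- A's inner double loop checks exactly the chain condition for period p ----
theorem pv_innerA_iff (l : List Char) (p : Nat) (hp : 1 ≤ p) :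
    pvInnerA l (l.length : Int) (p : Int) = true ↔ pvPer l p := by
  unfold pvInnerA
  have hfun : (fun (acc : Bool) (i : Int) =>
      (PySem.List.pyRange i ((l.length : Int) - p) p).foldl (fun acc2 j =>
        if PySem.List.pyGet? l j ≠ PySem.List.pyGet? l (j + p) then false else acc2) acc)
      = (fun (acc : Bool) (i : Int) =>
      acc && (PySem.List.pyRange i ((l.length : Int) - p) p).all (fun j =>
        !decide (PySem.List.pyGet? l j ≠ PySem.List.pyGet? l (j + p)))) := by
    funext acc i
    exact pv_foldl_if_false _ _ acc
  rw [hfun, pv_foldl_and, Bool.true_and, List.all_eq_true]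
  constructor
  · intro h j hj
    have hi : ((j % p : Nat) : Int) ∈ PySem.List.pyRange 0 (p : Int) 1 := by
      rw [PySem.List.mem_pyRange_one]
      constructor
      · exact Int.natCast_nonneg _
      · exact_mod_cast Nat.mod_lt _ (by omega)
    have hmem : ((j : Nat) : Int) ∈ PySem.List.pyRange ((j % p : Nat) : Int) ((l.length : Int) - p) (p : Int) := by
      rw [pv_mem_pyRange_pos (by exact_mod_cast hp)]
      refine ⟨j / p, ?_, by omega⟩
      have hsplit : j = j % p + p * (j / p) := (Nat.mod_add_div j p).symm
      exact_mod_cast congrArg (fun m : Nat => (m : Int)) hsplit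
    have := h _ hi
    rw [List.all_eq_true] at this
    have := this _ hmem
    simp only [Bool.not_eq_eq_eq_not, Bool.not_true, decide_eq_false_iff_not, not_not] at this
    have hj1 : PySem.List.pyGet? l ((j : Nat) : Int) = l[j]? := PySem.List.pyGet?_natCast l j
    have hj2 : PySem.List.pyGet? l (((j : Nat) : Int) + (p : Int)) = l[j + p]? := by
      rw [show ((j : Nat) : Int) + (p : Int) = ((j + p : Nat) : Int) by push_cast; ring]
      exact PySem.List.pyGet?_natCast l (j + p)
    rw [hj1, hj2] at this
    exact this
  · intro h i hi
    rw [List.all_eq_true]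
    intro j hj
    rw [pv_mem_pyRange_pos (by exact_mod_cast hp)] at hj
    obtain ⟨k, rfl, hlt⟩ := hj
    rw [PySem.List.mem_pyRange_one] at hi
    simp only [Bool.not_eq_eq_eq_not, Bool.not_true, decide_eq_false_iff_not, not_not]
    have hj0 : 0 ≤ i + (p : Int) * k := by
      have : (0:Int) ≤ (p : Int) * k := by positivity
      omega
    set m : Nat := (i + (p : Int) * k).toNat with hm
    have hmi : ((m : Nat) : Int) = i + (p : Int) * k := Int.toNat_of_nonneg hj0
    have hmp : m + p < l.length := by
      have : ((m + p : Nat) : Int) < (l.length : Int) := by push_cast; omega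
      exact_mod_cast this
    have := h m hmp
    rw [← hmi, PySem.List.pyGet?_natCast,
      show ((m : Nat) : Int) + (p : Int) = ((m + p : Nat) : Int) by push_cast; ring,
      PySem.List.pyGet?_natCast]
    exact this

-- ---- A's outer loop ----
theorem pv_loopA_iff (l : List Char) (ds : List Int) :
    pvLoopA l (l.length : Int) ds = true ↔
      ∀ d ∈ ds, ¬ (PySem.Int.mod (l.length : Int) d = 0 ∧ pvInnerA l (l.length : Int) d = true) := by
  induction ds with
  | nil => simp [pvLoopA]
  | cons d rest ih =>
    by_cases h1 : PySem.Int.mod (l.length : Int) d = 0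
    · by_cases h2 : pvInnerA l (l.length : Int) d = true
      · simp [pvLoopA, h1, h2]
      · simp [pvLoopA, h1, h2, ih]
    · simp [pvLoopA, h1, ih]

-- ---- A characterized ----
theorem pv_A_iff (id : String) :
    is_valid_id id = true ↔
      ∀ p : Nat, 1 ≤ p → p ∣ id.toList.length → 2 * p ≤ id.toList.length → ¬ pvPer id.toList p := by
  show pvLoopA id.toList _ _ = true ↔ _
  set l := id.toList with hl
  rw [pv_loopA_iff]
  constructor
  · intro h p hp hdvd h2p hper
    have hfd : PySem.Int.floordiv ((l.length : Nat) : Int) 2 = ((l.length / 2 : Nat) : Int) := by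
      exact_mod_cast PySem.Int.floordiv_natCast l.length 2
    have hd : (p : Int) ∈ PySem.List.pyRange 1 (PySem.Int.floordiv (l.length : Int) 2 + 1) 1 := by
      rw [PySem.List.mem_pyRange_one, hfd]
      have : p ≤ l.length / 2 := (Nat.le_div_iff_mul_le (by omega)).mpr (by omega)
      constructor
      · exact_mod_cast hp
      · have : (p : Int) ≤ ((l.length / 2 : Nat) : Int) := by exact_mod_cast this
        omega
    refine h _ hd ⟨?_, ?_⟩
    · rw [PySem.Int.mod_eq_zero_iff_dvd]; exact_mod_cast hdvd
    · exact (pv_innerA_iff l p hp).mpr hper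
  · intro h d hd ⟨hmod, hinner⟩
    have hfd : PySem.Int.floordiv ((l.length : Nat) : Int) 2 = ((l.length / 2 : Nat) : Int) := by
      exact_mod_cast PySem.Int.floordiv_natCast l.length 2
    rw [PySem.List.mem_pyRange_one, hfd] at hd
    obtain ⟨hd1, hd2⟩ := hd
    set p : Nat := d.toNat with hp
    have hdp : (p : Int) = d := Int.toNat_of_nonneg (by omega)
    have hp1 : 1 ≤ p := by omega
    have hple : p ≤ l.length / 2 := by
      have : (p : Int) ≤ ((l.length / 2 : Nat) : Int) := by omega
      exact_mod_cast this
    have h2p : 2 * p ≤ l.length := by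
      have := (Nat.le_div_iff_mul_le (k := 2) (by omega)).mp hple
      omega
    have hdvd : p ∣ l.length := by
      rw [PySem.Int.mod_eq_zero_iff_dvd] at hmod
      rw [← hdp] at hmod
      exact_mod_cast hmod
    rw [← hdp] at hinner
    exact h p hp1 hdvd h2p ((pv_innerA_iff l p hp1).mp hinner)

-- ---- (l++l) indexes as rotation ----
theorem pv_getElem?_append_self (l : List Char) (m : Nat) (hm : m < 2 * l.length) :
    (l ++ l)[m]? = l[m % l.length]? := by
  by_cases h : m < l.length
  · rw [List.getElem?_append_left h, Nat.mod_eq_of_lt h]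
  · have h1 : l.length ≤ m := by omega
    rw [List.getElem?_append_right h1, Nat.mod_eq_sub_mod h1,
      Nat.mod_eq_of_lt (by omega)]

-- ---- prefix of a drop of l++l  ↔  rotation invariance ----
theorem pv_prefix_drop_iff_rot (l : List Char) (t : Nat) (ht : t ≤ l.length) :
    l <+: (l ++ l).drop t ↔ pvRot l t := by
  constructor
  · intro h j hj
    obtain ⟨r, hr⟩ := h
    have h1 : ((l ++ l).drop t)[j]? = l[j]? := by
      rw [← hr, List.getElem?_append_left hj]
    rw [List.getElem?_drop] at h1
    rw [pv_getElem?_append_self l (t + j) (by omega)] at h1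
    rw [← h1, Nat.add_comm t j]
  · intro h
    rw [List.prefix_iff_eq_take]
    apply List.ext_getElem?
    intro j
    by_cases hj : j < l.length
    · rw [List.getElem?_take, if_pos hj, List.getElem?_drop,
        pv_getElem?_append_self l (t + j) (by omega), Nat.add_comm t j]
      exact h j hj
    · have h1 : l[j]? = none := by
        rw [List.getElem?_eq_none_iff]; omega
      have h2 : (List.take l.length ((l ++ l).drop t))[j]? = none := by
        rw [List.getElem?_eq_none_iff]
        calc (List.take l.length ((l ++ l).drop t)).length ≤ l.length := List.length_take_le _ _
          _ ≤ j := by omega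
      rw [h1, h2]

-- ---- B characterized (nonempty case) ----
theorem pv_B_iff (id : String) (hn : 1 ≤ id.toList.length) :
    is_valid_id_alt id = true ↔
      ¬ ∃ t : Nat, 1 ≤ t ∧ t < id.toList.length ∧ pvRot id.toList t := by
  have hne : id.toList.isEmpty = false := by
    rcases hL : id.toList with _ | ⟨c, l'⟩
    · rw [hL] at hn; simp at hn
    · rfl
  set l := id.toList with hl
  show (if l.isEmpty then true else !(PySem.Chars.isIn l (PySem.List.slice (l ++ l) (some 1) (some (-1))))) = true ↔ _
  rw [hne, if_neg Bool.false_ne_true]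
  simp only [Bool.not_eq_true', Bool.eq_false_iff]
  -- compute the slice: (l++l)[1:-1] = take (2*len-2) of drop 1
  have hslice : PySem.List.slice (l ++ l) (some 1) (some (-1))
      = List.take (2 * l.length - 2) (List.drop 1 (l ++ l)) := by
    simp only [PySem.List.slice, PySem.List.clampIdx, List.length_append]
    rw [if_pos (show (-1 : Int) < 0 by norm_num),
      if_neg (show ¬(((l.length + l.length : Nat) : Int) + -1 < 0) by omega),
      if_neg (show ¬((1 : Int) < 0) by norm_num)]
    have e1 : (((l.length + l.length : Nat) : Int) + -1).toNat = 2 * l.length - 1 := by omega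
    have e2 : min (Int.toNat 1) (l.length + l.length) = 1 := by
      simp only [Int.toNat_one]; omega
    rw [e1, e2]
    congr 1
  rw [hslice]
  simp only [ne_eq]
  rw [← PySem.Chars.exists_prefix_drop_iff_isIn]
  constructor
  · intro h ⟨t, ht1, ht2, hrot⟩
    apply h
    refine ⟨t - 1, ?_⟩
    rw [List.drop_take, List.drop_drop]
    have hteq : 1 + (t - 1) = t := by omega
    rw [hteq]
    rw [List.prefix_take_iff]
    constructor
    · exact (pv_prefix_drop_iff_rot l t (by omega)).mpr hrot
    · omega
  · intro h ⟨u, hu⟩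
    apply h
    rw [List.drop_take, List.drop_drop, List.prefix_take_iff] at hu
    obtain ⟨hpre, hlen⟩ := hu
    refine ⟨1 + u, by omega, by omega, ?_⟩
    exact (pv_prefix_drop_iff_rot l (1 + u) (by omega)).mp hpre

-- ---- rotation algebra ----
theorem pv_rot_compose (l : List Char) {a b : Nat} (ha : pvRot l a) (hb : pvRot l b) :
    pvRot l ((a + b) % l.length) := by
  intro j hj
  have hn : 0 < l.length := by omega
  have h1 := ha j hj
  have h2 := hb ((j + a) % l.length) (Nat.mod_lt _ hn)
  rw [h1, h2, Nat.mod_add_mod, Nat.add_mod_mod, Nat.add_assoc]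

theorem pv_rot_mul (l : List Char) {t : Nat} (ht : pvRot l t) (k : Nat) :
    pvRot l ((k * t) % l.length) := by
  induction k with
  | zero =>
    intro j hj
    rw [Nat.zero_mul, Nat.zero_mod, Nat.add_zero, Nat.mod_eq_of_lt hj]
  | succ k ih =>
    have := pv_rot_compose l ih ht
    rw [Nat.mod_add_mod] at this
    rw [Nat.add_mul, Nat.one_mul]
    exact this

theorem pv_rot_gcd (l : List Char) {t : Nat} (hn : 1 ≤ l.length) (h1 : 1 ≤ t)
    (h2 : t < l.length) (ht : pvRot l t) : pvRot l (Nat.gcd t l.length) := by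
  set n := l.length with hnn
  set g := Nat.gcd t n with hg
  have hbez := Nat.gcd_eq_gcd_ab t n
  set a : Int := Nat.gcdA t n with ha
  set b : Int := Nat.gcdB t n with hb
  set k : Nat := (a % (n : Int)).toNat with hk
  have hn0 : (0 : Int) < (n : Int) := by exact_mod_cast hn
  have hk0 : (0 : Int) ≤ a % (n : Int) := Int.emod_nonneg a (by omega)
  have hkc : ((k : Nat) : Int) = a % (n : Int) := Int.toNat_of_nonneg hk0
  -- (k * t) % n = g % n over the integers
  have hdvd : ((n : Int)) ∣ ((k : Int) * t - g) := by
    refine ⟨- (t : Int) * (a / (n : Int)) - b, ?_⟩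
    have : ((k : Nat) : Int) = a - (n : Int) * (a / (n : Int)) := by
      rw [hkc, Int.emod_def]
    rw [this, hbez]
    ring
  have hmodZ : ((k * t : Nat) : Int) % (n : Int) = ((g : Nat) : Int) % (n : Int) := by
    rw [Int.emod_eq_emod_iff_emod_sub_eq_zero]
    exact Int.emod_eq_zero_of_dvd hdvd
  have hmodN : (k * t) % n = g % n := by
    exact_mod_cast hmodZ
  have hgle : g ≤ t := Nat.gcd_le_left n (by omega)
  have hglt : g < n := by omega
  have := pv_rot_mul l ht k
  rw [hmodN, Nat.mod_eq_of_lt hglt] at this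
  exact this

-- ---- periodicity ↔ rotation, under divisibility ----
theorem pv_per_of_rot (l : List Char) {g : Nat} (h : pvRot l g) : pvPer l g := by
  intro j hj
  have := h j (by omega)
  rw [Nat.mod_eq_of_lt hj] at this
  exact this

-- chain periodicity with p ∣ n reduces every index mod p
theorem pv_chain_mod (l : List Char) {p : Nat} (hp : 1 ≤ p) (h : pvPer l p) :
    ∀ j : Nat, j < l.length → l[j]? = l[j % p]? := by
  intro j
  induction j using Nat.strong_induction_on with
  | _ j ih =>
    intro hj
    by_cases hjp : j < p
    · rw [Nat.mod_eq_of_lt hjp]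
    · have hple : p ≤ j := by omega
      have h1 : (j - p) + p < l.length := by omega
      have h2 := h (j - p) h1
      rw [Nat.sub_add_cancel hple] at h2
      rw [← h2, ih (j - p) (by omega) (by omega), Nat.mod_eq_sub_mod hple]

theorem pv_rot_of_per (l : List Char) {p : Nat} (hp : 1 ≤ p) (hdvd : p ∣ l.length)
    (h : pvPer l p) : pvRot l p := by
  intro j hj
  have hn : 0 < l.length := by omega
  rw [pv_chain_mod l hp h j hj,
    pv_chain_mod l hp h ((j + p) % l.length) (Nat.mod_lt _ hn),
    Nat.mod_mod_of_dvd _ hdvd, Nat.add_mod_right]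

-- ---- the two existential forms agree ----
theorem pv_exists_iff (l : List Char) (hn : 1 ≤ l.length) :
    (∃ p : Nat, 1 ≤ p ∧ p ∣ l.length ∧ 2 * p ≤ l.length ∧ pvPer l p) ↔
      (∃ t : Nat, 1 ≤ t ∧ t < l.length ∧ pvRot l t) := by
  constructor
  · rintro ⟨p, h1, h2, h3, h4⟩
    exact ⟨p, h1, by omega, pv_rot_of_per l h1 h2 h4⟩
  · rintro ⟨t, h1, h2, h3⟩
    set g := Nat.gcd t l.length with hg
    have hg1 : 1 ≤ g := Nat.gcd_pos_of_pos_left _ (by omega)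
    have hgdvd : g ∣ l.length := Nat.gcd_dvd_right _ _
    have hgle : g ≤ t := Nat.gcd_le_left _ (by omega)
    have hrot : pvRot l g := pv_rot_gcd l hn h1 h2 h3
    have h2g : 2 * g ≤ l.length := by
      obtain ⟨c, hc⟩ := hgdvd
      have hc2 : 2 ≤ c := by nlinarith
      nlinarith
    exact ⟨g, hg1, hgdvd, h2g, pv_per_of_rot l hrot⟩

-- ===== VERDICT (by name: the statement is the Claim_ definition above) =====
theorem is_valid_id_spec : Claim_equal_is_valid_id := by
  intro id _
  unfold Spec_is_valid_id
  by_cases hn : 1 ≤ id.toList.length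
  · have hA := pv_A_iff id
    have hB := pv_B_iff id hn
    have hE := pv_exists_iff id.toList hn
    cases hbA : is_valid_id id <;> cases hbB : is_valid_id_alt id <;> try rfl
    · -- A false, B true
      exfalso
      have hBt := hB.mp hbB
      have hnot : ¬ ∀ p : Nat, 1 ≤ p → p ∣ id.toList.length → 2 * p ≤ id.toList.length → ¬ pvPer id.toList p := by
        intro hall
        have := hA.mpr hall
        rw [hbA] at this
        exact Bool.false_ne_true this
      simp only [not_forall, not_not] at hnot
      obtain ⟨p, h1, h2, h3, h4⟩ := hnot
      exact hBt (hE.mp ⟨p, h1, h2, h3, h4⟩)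
    · -- A true, B false
      exfalso
      have hAt := hA.mp hbA
      have hBf : ¬ is_valid_id_alt id = true := by rw [hbB]; exact Bool.false_ne_true
      have hex : ∃ t : Nat, 1 ≤ t ∧ t < id.toList.length ∧ pvRot id.toList t := by
        by_contra hno
        exact hBf (hB.mpr hno)
      obtain ⟨p, h1, h2, h3, h4⟩ := hE.mpr hex
      exact hAt p h1 h2 h3 h4
  · -- empty string: both sides are true
    have h0 : id.toList.length = 0 := by omega
    have hA : is_valid_id id = true := by
      show pvLoopA id.toList _ _ = true
      rw [h0]
      norm_num [PySem.Int.floordiv, PySem.List.pyRange_one_eq_nil, pvLoopA]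
    have hB : is_valid_id_alt id = true := by
      show (if id.toList.isEmpty then true else _) = true
      simp [List.length_eq_zero_iff.mp h0]
    rw [hA, hB]
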